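-- pv_equiv track=rewrite | github.com/JeremyKalfus/AutoMath | artifacts/cyclic-difference-set-465-145-45/orbit_contraction_check.py | correlation_matrices
-- ===== SOURCE A (Python) =====
-- def correlation_matrices(modulus: int, orbits: list[tuple[int, ...]]) -> list[list[list[int]]]:
--     mats = []
--     for orbit in orbits[1:]:
--         rep = orbit[0]
--         size = len(orbits)
--         mat = [[0] * size for _ in range(size)]
--         for i, oi in enumerate(orbits):
--             for j, oj in enumerate(orbits):
--                 count = 0
--                 for u in oi:
--                     for v in oj:
--                         if (u - v) % modulus == rep:
--                             count += 1
--                 mat[i][j] = count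
--         mats.append(mat)
--     return mats
-- ===== SOURCE B (Python) =====
-- def correlation_matrices(modulus: int, orbits: list[tuple[int, ...]]) -> list[list[list[int]]]:
--     # One pass over all element-pair differences per orbit pair: count residues in a dict,
--     # then each representative's matrix is a simple lookup (A recounts for every rep).
--     if len(orbits) <= 1:
--         return []
--     diff_counts = []
--     for oi in orbits:
--         row = []
--         for oj in orbits:
--             d = {}
--             for u in oi:
--                 for v in oj:
--                     r = (u - v) % modulus
--                     d[r] = d.get(r, 0) + 1
--             row.append(d)
--         diff_counts.append(row)
--     return [[[d.get(orbit[0], 0) for d in row] for row in diff_counts]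
--             for orbit in orbits[1:]]
-- ===== Notes on version B (the rewrite author's own statement) =====
-- stated objective: faster
-- what changed: B counts every orbit-pair difference residue once into per-(i,j) dicts in a single pass over element pairs and reads each representative's matrix off by dict lookup, instead of A's full recount of all pairs for every representative.
import Mathlib
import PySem

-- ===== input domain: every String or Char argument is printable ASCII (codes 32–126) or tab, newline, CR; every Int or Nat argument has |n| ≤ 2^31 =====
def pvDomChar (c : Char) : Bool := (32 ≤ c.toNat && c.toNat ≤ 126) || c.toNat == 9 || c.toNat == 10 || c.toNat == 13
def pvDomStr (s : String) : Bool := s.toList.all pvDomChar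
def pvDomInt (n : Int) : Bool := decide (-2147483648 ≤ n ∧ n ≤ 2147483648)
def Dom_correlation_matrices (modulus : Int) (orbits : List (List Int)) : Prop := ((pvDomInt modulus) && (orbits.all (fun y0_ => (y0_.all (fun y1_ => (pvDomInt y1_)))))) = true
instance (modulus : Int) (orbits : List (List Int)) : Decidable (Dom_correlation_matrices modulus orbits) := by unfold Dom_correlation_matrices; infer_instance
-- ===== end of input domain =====

-- B counts each orbit-pair's difference residues ONCE into a dict and serves every
-- representative's matrix by lookup, instead of A's recount for every representative.

-- ===== PORT A =====
-- A fills a preallocated size×size zero matrix cell by cell in index order; the port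
-- builds the same rows/cells in the same order by nested maps, with A's nested
-- counting loops as nested foldls.  orbit[0] (IndexError on []) and '% modulus'
-- (ZeroDivisionError on 0) are total here; Pre_ excludes exactly those raising inputs.
def correlation_matrices (modulus : Int) (orbits : List (List Int)) : List (List (List Int)) :=
  (orbits.drop 1).foldl (fun mats orbit =>
    let rep := orbit.headI
    mats ++ [orbits.map (fun oi =>
      orbits.map (fun oj =>
        oi.foldl (fun count u =>
          oj.foldl (fun count v =>
            if PySem.Int.mod (u - v) modulus = rep then count + 1 else count) count) 0))]) []

-- ===== PORT B =====
def correlation_matrices_alt (modulus : Int) (orbits : List (List Int)) : List (List (List Int)) :=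
  if orbits.length ≤ 1 then []
  else
    let diff_counts : List (List (PySem.Dict Int Int)) :=
      orbits.map (fun oi => orbits.map (fun oj =>
        oi.foldl (fun d u => oj.foldl (fun d v =>
          let r := PySem.Int.mod (u - v) modulus
          d.insert r (d.getD r 0 + 1)) d) PySem.Dict.empty))
    (orbits.drop 1).map (fun orbit =>
      diff_counts.map (fun row => row.map (fun d => d.getD orbit.headI 0)))

-- ===== PRECONDITION & SPEC =====
-- Pre_ excludes exactly the inputs where Python A raises: an empty orbit among
-- orbits[1:] (IndexError on orbit[0]) and modulus = 0 when orbits[1:] is nonempty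
-- (ZeroDivisionError); Python B raises there too.
def Pre_correlation_matrices (modulus : Int) (orbits : List (List Int)) : Prop :=
  orbits.drop 1 ≠ [] → (modulus ≠ 0 ∧ ∀ o ∈ orbits.drop 1, o ≠ [])
instance (modulus : Int) (orbits : List (List Int)) : Decidable (Pre_correlation_matrices modulus orbits) := by unfold Pre_correlation_matrices; infer_instance
def pvWitness_correlation_matrices : Int × List (List Int) := (5, [[0], [1, 2], [3]])

def Spec_correlation_matrices (modulus : Int) (orbits : List (List Int)) (out : List (List (List Int))) : Prop := out = correlation_matrices_alt modulus orbits
instance (modulus : Int) (orbits : List (List Int)) (out : List (List (List Int))) : Decidable (Spec_correlation_matrices modulus orbits out) := by unfold Spec_correlation_matrices; infer_instance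

-- ===== CLAIM (what is proved, stated in full; the proofs are below) =====
def Claim_equal_correlation_matrices : Prop := ∀ (modulus : Int) (orbits : List (List Int)), Dom_correlation_matrices modulus orbits → Pre_correlation_matrices modulus orbits → Spec_correlation_matrices modulus orbits (correlation_matrices modulus orbits)

-- ===== LEMMAS AND PROOFS =====

-- B's inner counting loop over oj: the dict's count at `rep` grows by the number of
-- v ∈ oj whose difference residue with u is rep.
theorem pvAlt_inner (modulus rep u : Int) (oj : List Int) (d : PySem.Dict Int Int) :
    (oj.foldl (fun d v =>
        let r := PySem.Int.mod (u - v) modulus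
        d.insert r (d.getD r 0 + 1)) d).getD rep 0
      = d.getD rep 0 + (oj.countP (fun v => decide (PySem.Int.mod (u - v) modulus = rep)) : Int) := by
  induction oj generalizing d with
  | nil => simp
  | cons v oj ih =>
      simp only [List.foldl_cons, ih, List.countP_cons]
      by_cases h : PySem.Int.mod (u - v) modulus = rep
      · simp only [h, PySem.Dict.getD_insert_self]
        simp
        ring
      · rw [PySem.Dict.getD_insert_of_ne _ _ _ (by exact fun he => h he.symm)]
        simp [h]

-- A's whole counting computation equals a lookup in B's dict after the same traversal.
theorem pvCount_eq (modulus rep : Int) (oj : List Int) :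
    ∀ (oi : List Int) (d : PySem.Dict Int Int) (c : Int), d.getD rep 0 = c →
      (oi.foldl (fun d u => oj.foldl (fun d v =>
          let r := PySem.Int.mod (u - v) modulus
          d.insert r (d.getD r 0 + 1)) d) d).getD rep 0
        = oi.foldl (fun count u =>
            oj.foldl (fun count v =>
              if PySem.Int.mod (u - v) modulus = rep then count + 1 else count) count) c := by
  intro oi
  induction oi with
  | nil => intro d c h; simpa using h
  | cons u oi ih =>
      intro d c h
      simp only [List.foldl_cons]
      apply ih
      rw [pvAlt_inner, h]
      have hc := PySem.List.foldl_count_if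
        (fun v => decide (PySem.Int.mod (u - v) modulus = rep)) oj c
      simp only [decide_eq_true_eq] at hc
      exact hc.symm

theorem correlation_matrices_spec : Claim_equal_correlation_matrices := by
  intro modulus orbits _ _
  unfold Spec_correlation_matrices correlation_matrices correlation_matrices_alt
  rw [PySem.List.foldl_append_singleton_eq_map]
  by_cases hlen : orbits.length ≤ 1
  · have : orbits.drop 1 = [] := by
      cases orbits with
      | nil => rfl
      | cons a t => simp at hlen ⊢; omega
    simp [hlen, this]
  · simp only [hlen, if_false, List.nil_append, List.map_map]
    apply List.map_congr_left
    intro orbit _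
    apply List.map_congr_left
    intro oi _
    simp only [Function.comp_apply, List.map_map]
    apply List.map_congr_left
    intro oj _
    simp only [Function.comp_apply]
    exact (pvCount_eq modulus orbit.headI oj oi PySem.Dict.empty 0 rfl).symm
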